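-- pv_equiv track=rewrite | github.com/Future04108/Cyron-Assistant | backend/utils/text_splitter.py | chunk_knowledge
-- ===== SOURCE A (Python) =====
-- from typing import List, Tuple
--
-- MAX_CHUNK_CHARS_DEFAULT = 2000
--
-- CHUNK_OVERLAP_DEFAULT = 300
--
-- def split_logical_sections(text: str) -> List[str]:
--     """Split text into logical sections based on headings and blank lines."""
--     lines = text.splitlines()
--     sections: list[list[str]] = []
--     current: list[str] = []
--
--     def _is_heading(line: str) -> bool:
--         stripped = line.lstrip()
--         return stripped.startswith("#") or (
--             stripped.startswith("**") and stripped.endswith("**")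
--         )
--
--     for line in lines:
--         if _is_heading(line) and current:
--             sections.append(current)
--             current = [line]
--         else:
--             current.append(line)
--     if current:
--         sections.append(current)
--
--     # Join lines back into paragraphs
--     return ["\n".join(section).strip() for section in sections if "".join(section).strip()]
--
-- def recursive_char_split(
--     text: str,
--     max_len: int = MAX_CHUNK_CHARS_DEFAULT,
--     overlap: int = CHUNK_OVERLAP_DEFAULT,
-- ) -> List[str]:
--     """Split text by characters with fixed size and overlap."""
--     if len(text) <= max_len:
--         return [text]
--
--     chunks: list[str] = []
--     start = 0
--     length = len(text)
--
--     while start < length: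
--         end = min(start + max_len, length)
--         chunk = text[start:end]
--         chunks.append(chunk)
--         if end == length:
--             break
--         start = max(0, end - overlap)
--
--     return chunks
--
-- def chunk_knowledge(
--     title: str,
--     content: str,
--     max_chunk_chars: int = MAX_CHUNK_CHARS_DEFAULT,
--     overlap: int = CHUNK_OVERLAP_DEFAULT,
-- ) -> List[Tuple[str, str]]:
--     """Chunk knowledge content into (title, content) pairs."""
--     # First try logical sections
--     logical_sections = split_logical_sections(content)
--     if not logical_sections:
--         logical_sections = [content]
--
--     chunks: list[tuple[str, str]] = []
--
--     for section in logical_sections: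
--         if len(section) <= max_chunk_chars:
--             chunks.append((title, section))
--             continue
--
--         # Fallback to recursive char split for large sections
--         for part in recursive_char_split(section, max_len=max_chunk_chars, overlap=overlap):
--             chunks.append((title, part))
--
--     # Add "Part X" suffix for subsequent chunks
--     titled_chunks: list[tuple[str, str]] = []
--     for idx, (t, c) in enumerate(chunks, start=1):
--         if idx == 1:
--             titled_chunks.append((t, c))
--         else:
--             titled_chunks.append((f"{t} – Part {idx}", c))
--
--     return titled_chunks
-- ===== SOURCE B (Python) =====
-- from typing import List, Tuple
--
-- MAX_CHUNK_CHARS_DEFAULT = 2000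
-- CHUNK_OVERLAP_DEFAULT = 300
--
--
-- def _is_heading(line: str) -> bool:
--     stripped = line.lstrip()
--     return stripped.startswith("#") or (
--         stripped.startswith("**") and stripped.endswith("**")
--     )
--
--
-- def _sections(lines: List[str]) -> List[str]:
--     """Peel off one section at a time: the first line plus all following
--     non-heading lines; keep it (joined and stripped) only if it has content."""
--     out: List[str] = []
--     while lines:
--         k = 1
--         while k < len(lines) and not _is_heading(lines[k]):
--             k += 1
--         head, lines = lines[:k], lines[k:]
--         if "".join(head).strip():
--             out.append("\n".join(head).strip())
--     return out
--
--
-- def _windows(text: str, max_len: int, overlap: int) -> List[str]: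
--     """Overlapping windows of max_len characters starting every
--     max_len - overlap characters; expects 0 <= overlap < max_len < len(text).
--     The window count is ceil((len(text) - max_len) / step) + 1."""
--     step = max_len - overlap
--     n = (len(text) - max_len + step - 1) // step + 1
--     return [text[k * step : k * step + max_len] for k in range(n)]
--
--
-- def chunk_knowledge(
--     title: str,
--     content: str,
--     max_chunk_chars: int = MAX_CHUNK_CHARS_DEFAULT,
--     overlap: int = CHUNK_OVERLAP_DEFAULT,
-- ) -> List[Tuple[str, str]]:
--     secs = _sections(content.splitlines()) or [content]
--     out: list = []
--     for sec in secs: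
--         parts = [sec] if len(sec) <= max_chunk_chars else _windows(sec, max_chunk_chars, overlap)
--         for p in parts:
--             n = len(out) + 1
--             out.append((title, p) if n == 1 else (f"{title} – Part {n}", p))
--     return out
-- ===== Notes on version B (the rewrite author's own statement) =====
-- stated objective: alternative
-- what changed: B replaces A's accumulator fold over lines by a splitter that peels one section at a time (first line plus following non-heading lines, filtered and joined on the spot), replaces A's while-loop of overlapping windows by a closed-form window count at start positions k*(max-overlap), and fuses the 'Part X' renumbering pass into the single output loop via the output length; …
-- outside the precondition, e.g. on chunk_knowledge('t', 'abcdef', 2, 3): A does not finish within the time limit, B returns []; on chunk_knowledge('t', 'abcdef', 4, -10): A returns [('t', 'abcd')], B returns [('t', 'abcd'), ('t – Part 2', '')]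
import Mathlib
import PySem

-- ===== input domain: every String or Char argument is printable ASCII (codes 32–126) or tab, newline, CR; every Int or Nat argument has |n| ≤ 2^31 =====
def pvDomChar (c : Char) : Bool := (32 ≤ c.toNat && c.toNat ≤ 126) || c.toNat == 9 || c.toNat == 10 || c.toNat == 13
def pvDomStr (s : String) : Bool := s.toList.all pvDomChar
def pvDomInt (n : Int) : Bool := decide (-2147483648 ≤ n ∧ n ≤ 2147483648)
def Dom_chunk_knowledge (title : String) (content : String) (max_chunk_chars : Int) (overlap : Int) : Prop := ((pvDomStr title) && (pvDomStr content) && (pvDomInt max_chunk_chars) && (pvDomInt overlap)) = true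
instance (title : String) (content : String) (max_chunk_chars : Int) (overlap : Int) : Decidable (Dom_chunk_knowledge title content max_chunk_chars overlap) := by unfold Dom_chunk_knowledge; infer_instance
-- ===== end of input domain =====

-- B peels sections one at a time instead of folding an accumulator over the lines,
-- computes the overlapping windows by a closed-form count, and numbers the chunks in
-- the same loop that emits them (objective: alternative).

-- ===== PORT A =====
def pvIsHeadingA (line : String) : Bool :=
  let stripped := PySem.Str.lstrip line
  PySem.Str.startswith stripped "#" ||
    (PySem.Str.startswith stripped "**" && PySem.Str.endswith stripped "**")

def pvStepA (st : List (List String) × List String) (line : String) :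
    List (List String) × List String :=
  if pvIsHeadingA line && !st.2.isEmpty then (st.1 ++ [st.2], [line])
  else (st.1, st.2 ++ [line])

def split_logical_sections (text : String) : List String :=
  let lines := PySem.Str.splitlines text
  let st := lines.foldl pvStepA ([], [])
  let sections := if st.2.isEmpty then st.1 else st.1 ++ [st.2]
  (sections.filter (fun sec => PySem.Str.strip (PySem.Str.join "" sec) != "")).map
    (fun sec => PySem.Str.strip (PySem.Str.join "\n" sec))

def pvRcsLoop (text : String) (L maxLen overlap : Int) :
    Nat → Int → List String → List String
  | 0, _, chunks => chunks
  | fuel + 1, start, chunks =>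
    if start < L then
      let e := min (start + maxLen) L
      let chunk := PySem.Str.slice text (some start) (some e)
      if e == L then chunks ++ [chunk]
      else pvRcsLoop text L maxLen overlap fuel (max 0 (e - overlap)) (chunks ++ [chunk])
    else chunks

def recursive_char_split (text : String) (maxLen overlap : Int) : List String :=
  if PySem.Str.len text ≤ maxLen then [text]
  else pvRcsLoop text (PySem.Str.len text) maxLen overlap (text.toList.length + 1) 0 []

def pvTitleA (title : String) (p : Int × (String × String)) : String × String :=
  if p.1 == 1 then p.2 else (p.2.1 ++ " – Part " ++ PySem.Int.toStr p.1, p.2.2)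

def chunk_knowledge (title : String) (content : String) (max_chunk_chars : Int) (overlap : Int) : List (String × String) :=
  let ls0 := split_logical_sections content
  let logical_sections := if ls0.isEmpty then [content] else ls0
  let chunks := logical_sections.foldl
    (fun acc sec =>
      if PySem.Str.len sec ≤ max_chunk_chars then acc ++ [(title, sec)]
      else (recursive_char_split sec max_chunk_chars overlap).foldl
        (fun a part => a ++ [(title, part)]) acc) []
  (PySem.List.enumerate chunks 1).foldl (fun a p => a ++ [pvTitleA title p]) []

-- ===== PORT B =====
-- B uses the same heading test (pvIsHeadingA).
-- B's inner `while k < len(lines) and not _is_heading(lines[k])` prefix scan is the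
-- takeWhile/dropWhile split of the tail.
def pvSectionsB : List String → List String
  | [] => []
  | l :: ls =>
    let head := l :: ls.takeWhile (fun x => !pvIsHeadingA x)
    let rest := ls.dropWhile (fun x => !pvIsHeadingA x)
    (if PySem.Str.strip (PySem.Str.join "" head) != ""
      then [PySem.Str.strip (PySem.Str.join "\n" head)] else []) ++ pvSectionsB rest
  termination_by lines => lines.length
  decreasing_by
    simp only [List.length_cons]
    exact Nat.lt_succ_of_le (List.length_dropWhile_le _ _)

def pvWindowsB (text : String) (maxLen overlap : Int) : List String :=
  let step := maxLen - overlap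
  let n := PySem.Int.floordiv (PySem.Str.len text - maxLen + step - 1) step + 1
  (List.range n.toNat).map
    (fun (k : Nat) => PySem.Str.slice text (some ((k : Int) * step)) (some ((k : Int) * step + maxLen)))

def chunk_knowledge_alt (title : String) (content : String) (max_chunk_chars : Int) (overlap : Int) : List (String × String) :=
  let secs0 := pvSectionsB (PySem.Str.splitlines content)
  let secs := if secs0.isEmpty then [content] else secs0
  secs.foldl
    (fun out sec =>
      let parts := if PySem.Str.len sec ≤ max_chunk_chars then [sec]
                   else pvWindowsB sec max_chunk_chars overlap
      parts.foldl
        (fun out p =>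
          let n : Int := (out.length : Int) + 1
          out ++ [if n == 1 then (title, p)
                  else (title ++ " – Part " ++ PySem.Int.toStr n, p)]) out) []

-- ===== PRECONDITION & SPEC =====
-- Pre_ restricts to the natural window domain 0 ≤ overlap < max_chunk_chars unless the
-- whole content fits in one chunk: with overlap ≥ max_chunk_chars A's window loop cannot
-- advance and it diverges whenever some section exceeds max_chunk_chars (on the remaining
-- excluded inputs with short sections A happens to return), and negative overlap is a
-- gap-producing window step outside the natural domain on which A's early-stop value is
-- accidental.
def Pre_chunk_knowledge (title : String) (content : String) (max_chunk_chars : Int) (overlap : Int) : Prop :=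
  (0 ≤ overlap ∧ overlap < max_chunk_chars) ∨ PySem.Str.len content ≤ max_chunk_chars
instance (title : String) (content : String) (max_chunk_chars : Int) (overlap : Int) : Decidable (Pre_chunk_knowledge title content max_chunk_chars overlap) := by unfold Pre_chunk_knowledge; infer_instance

def pvWitness_chunk_knowledge : String × String × Int × Int := ("t", "hello", 10, 3)

def Spec_chunk_knowledge (title : String) (content : String) (max_chunk_chars : Int) (overlap : Int) (out : List (String × String)) : Prop := out = chunk_knowledge_alt title content max_chunk_chars overlap
instance (title : String) (content : String) (max_chunk_chars : Int) (overlap : Int) (out : List (String × String)) : Decidable (Spec_chunk_knowledge title content max_chunk_chars overlap out) := by unfold Spec_chunk_knowledge; infer_instance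

-- ===== CLAIM (what is proved, stated in full; the proofs are below) =====
def Claim_equal_chunk_knowledge : Prop := ∀ (title : String) (content : String) (max_chunk_chars : Int) (overlap : Int), Dom_chunk_knowledge title content max_chunk_chars overlap → Pre_chunk_knowledge title content max_chunk_chars overlap → Spec_chunk_knowledge title content max_chunk_chars overlap (chunk_knowledge title content max_chunk_chars overlap)

-- ===== LEMMAS AND PROOFS =====

-- raw (unfiltered, unjoined) sections, shaped like pvSectionsB's recursion
def pvRawSecs : List String → List (List String)
  | [] => []
  | l :: ls =>
    (l :: ls.takeWhile (fun x => !pvIsHeadingA x)) ::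
      pvRawSecs (ls.dropWhile (fun x => !pvIsHeadingA x))
  termination_by lines => lines.length
  decreasing_by
    simp only [List.length_cons]
    exact Nat.lt_succ_of_le (List.length_dropWhile_le _ _)

theorem pvSectionsB_eq_rawSecs (lines : List String) :
    pvSectionsB lines =
      ((pvRawSecs lines).filter
          (fun sec => PySem.Str.strip (PySem.Str.join "" sec) != "")).map
        (fun sec => PySem.Str.strip (PySem.Str.join "\n" sec)) := by
  induction lines using pvSectionsB.induct with
  | case1 => simp [pvSectionsB, pvRawSecs]
  | case2 l ls rest ih =>
    rw [pvSectionsB, pvRawSecs]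
    simp only [List.filter_cons]
    by_cases h : PySem.Str.strip (PySem.Str.join "" (l :: ls.takeWhile (fun x => !pvIsHeadingA x))) != ""
    · simp only [h, if_pos, List.map_cons, List.cons_append, List.nil_append]
      exact congrArg _ ih
    · simp only [Bool.not_eq_true] at h
      simp only [h, bne_self_eq_false, Bool.false_eq_true, if_false, List.nil_append]
      exact ih

theorem pvFoldA_eq (lines : List String) (secs : List (List String)) (cur : List String)
    (h : cur ≠ []) :
    (let st := lines.foldl pvStepA (secs, cur)
     if st.2.isEmpty then st.1 else st.1 ++ [st.2]) =
      secs ++ (cur ++ lines.takeWhile (fun x => !pvIsHeadingA x)) ::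
        pvRawSecs (lines.dropWhile (fun x => !pvIsHeadingA x)) := by
  induction lines generalizing secs cur with
  | nil =>
    simp only [List.foldl_nil, List.takeWhile_nil, List.dropWhile_nil, List.append_nil]
    rw [pvRawSecs]
    simp [List.isEmpty_iff, h]
  | cons l ls ih =>
    simp only [List.foldl_cons]
    by_cases hb : pvIsHeadingA l = true
    · have hstep : pvStepA (secs, cur) l = (secs ++ [cur], [l]) := by
        unfold pvStepA
        rw [if_pos]
        simp [hb, h]
      rw [hstep, ih _ _ (by simp)]
      rw [List.takeWhile_cons_of_neg (by simp [hb]), List.dropWhile_cons_of_neg (by simp [hb])]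
      rw [pvRawSecs]
      simp [List.append_assoc]
    · have hstep : pvStepA (secs, cur) l = (secs, cur ++ [l]) := by
        unfold pvStepA
        rw [if_neg]
        simp [hb]
      rw [hstep, ih _ _ (by simp)]
      rw [List.takeWhile_cons_of_pos (by simp [hb]), List.dropWhile_cons_of_pos (by simp [hb])]
      simp [List.append_assoc]

theorem pvSections_eq (content : String) :
    split_logical_sections content = pvSectionsB (PySem.Str.splitlines content) := by
  have key : ∀ lines : List String,
      (if (lines.foldl pvStepA ([], [])).2.isEmpty then (lines.foldl pvStepA ([], [])).1
       else (lines.foldl pvStepA ([], [])).1 ++ [(lines.foldl pvStepA ([], [])).2]) =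
        pvRawSecs lines := by
    intro lines
    cases lines with
    | nil => simp [pvRawSecs]
    | cons l ls =>
      simp only [List.foldl_cons]
      have hstep : pvStepA ([], []) l = ([], [l]) := by unfold pvStepA; simp
      rw [hstep]
      have := pvFoldA_eq ls [] [l] (by simp)
      simp only [] at this
      rw [this, pvRawSecs]
      simp
  simp only [split_logical_sections]
  rw [key, pvSectionsB_eq_rawSecs]

-- ---- windows ----

theorem pvSliceClamp (s : String) (a b b' : Int) (ha : 0 ≤ a)
    (hb : (s.toList.length : Int) ≤ b) (hb' : (s.toList.length : Int) ≤ b') :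
    PySem.Str.slice s (some a) (some b) = PySem.Str.slice s (some a) (some b') := by
  unfold PySem.Str.slice PySem.Chars.slice
  congr 1
  rw [PySem.List.slice_toNat _ ha (by omega), PySem.List.slice_toNat _ ha (by omega)]
  rw [List.take_of_length_le (by rw [List.length_drop]; omega),
    List.take_of_length_le (by rw [List.length_drop]; omega)]

theorem pvRcsW (sec : String) (m v k0 mm last : Int) (hstep : 1 ≤ m - v)
    (hL : m < PySem.Str.len sec)
    (hk0a : (k0 - 1) * (m - v) < PySem.Str.len sec - m)
    (hk0b : PySem.Str.len sec - m ≤ k0 * (m - v))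
    (hmma : (mm - 1) * (m - v) < PySem.Str.len sec)
    (hmmb : PySem.Str.len sec ≤ mm * (m - v))
    (hlast : last = min k0 (mm - 1)) :
    ∀ (fuel : Nat) (j : Int) (chunks : List String), 0 ≤ j → j ≤ last →
      last - j + 1 < (fuel : Int) →
      pvRcsLoop sec (PySem.Str.len sec) m v fuel (j * (m - v)) chunks =
        chunks ++ (List.range (last + 1 - j).toNat).map
          (fun (i : Nat) => PySem.Str.slice sec (some ((j + (i : Int)) * (m - v)))
            (some ((j + (i : Int)) * (m - v) + m))) := by
  intro fuel
  induction fuel with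
  | zero => intro j chunks _ _ hf; simp at hf; omega
  | succ f ih =>
    intro j chunks hj0 hjl hf
    have hstep0 : (0 : Int) < m - v := by omega
    have hjmm : j ≤ mm - 1 := by omega
    have hstart_lt : j * (m - v) < PySem.Str.len sec := by
      have h1 : j * (m - v) ≤ (mm - 1) * (m - v) :=
        mul_le_mul_of_nonneg_right hjmm (le_of_lt hstep0)
      omega
    have hstart0 : 0 ≤ j * (m - v) := mul_nonneg hj0 (le_of_lt hstep0)
    rw [pvRcsLoop]
    rw [if_pos hstart_lt]
    by_cases hend : PySem.Str.len sec ≤ j * (m - v) + m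
    · -- last chunk: the window reaches the end
      have hmin : min (j * (m - v) + m) (PySem.Str.len sec) = PySem.Str.len sec :=
        min_eq_right hend
      have hk0j : k0 ≤ j := by
        have h1 : (k0 - 1) * (m - v) < j * (m - v) := by omega
        have h2 : k0 - 1 < j := lt_of_mul_lt_mul_right h1 (le_of_lt hstep0)
        omega
      have hjlast : j = last := by omega
      have hone : (last + 1 - j).toNat = 1 := by omega
      rw [hmin]
      rw [if_pos (by simp)]
      rw [hone, List.range_one]
      have hchunk : PySem.Str.slice sec (some (j * (m - v))) (some (PySem.Str.len sec)) =
          PySem.Str.slice sec (some (j * (m - v))) (some (j * (m - v) + m)) := by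
        apply pvSliceClamp sec _ _ _ hstart0
        · rw [← PySem.Str.len_eq]
        · rw [← PySem.Str.len_eq]; exact hend
      simp only [List.map_cons, List.map_nil, Nat.cast_zero, add_zero]
      rw [hchunk]
    · -- the window ends strictly before the end of the text
      push_neg at hend
      have hmin : min (j * (m - v) + m) (PySem.Str.len sec) = j * (m - v) + m :=
        min_eq_left (le_of_lt hend)
      rw [hmin]
      rw [if_neg (by simp only [beq_iff_eq]; omega)]
      have hnext : max 0 (j * (m - v) + m - v) = (j + 1) * (m - v) := by
        have : j * (m - v) + m - v = (j + 1) * (m - v) := by ring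
        rw [this]
        exact max_eq_right (mul_nonneg (by omega) (le_of_lt hstep0))
      rw [hnext]
      have hjk0 : j < k0 := by
        have h1 : j * (m - v) < k0 * (m - v) := by omega
        exact lt_of_mul_lt_mul_right h1 (le_of_lt hstep0)
      by_cases hj1 : j + 1 ≤ last
      · rw [ih (j + 1) _ (by omega) hj1 (by push_cast at hf ⊢; omega)]
        have hn : (last + 1 - j).toNat = (last + 1 - (j + 1)).toNat + 1 := by omega
        rw [hn, List.range_succ_eq_map, List.map_cons, List.map_map]
        simp only [Nat.cast_zero, add_zero, List.append_assoc, List.cons_append,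
          List.nil_append]
        congr 2
        apply List.map_congr_left
        intro i _
        simp only [Function.comp]
        congr 2 <;> push_cast <;> ring
      · -- j = last: the next start position falls beyond the text, loop stops
        have hjlast : j = last := by omega
        have hlmm : last = mm - 1 := by omega
        have hge : ¬ ((j + 1) * (m - v) < PySem.Str.len sec) := by
          have : mm * (m - v) ≤ (j + 1) * (m - v) := by
            apply mul_le_mul_of_nonneg_right _ (le_of_lt hstep0)
            omega
          omega
        have hf1 : 1 ≤ f := by omega
        obtain ⟨f', rfl⟩ : ∃ f', f = f' + 1 := ⟨f - 1, by omega⟩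
        rw [pvRcsLoop]
        rw [if_neg hge]
        have hone : (last + 1 - j).toNat = 1 := by omega
        simp [hone]

theorem pvRcs_eq (sec : String) (m v : Int) (hov : 0 ≤ v) (hvm : v < m)
    (hL : m < PySem.Str.len sec) :
    recursive_char_split sec m v = pvWindowsB sec m v := by
  have hstep0 : (0 : Int) < m - v := by omega
  have hk0 := (PySem.Int.neg_floordiv_neg_eq_iff_of_pos (a := PySem.Str.len sec - m)
    (b := m - v) hstep0).mp rfl
  have hmm := (PySem.Int.neg_floordiv_neg_eq_iff_of_pos (a := PySem.Str.len sec)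
    (b := m - v) hstep0).mp rfl
  have hq := (PySem.Int.floordiv_eq_iff_of_pos
    (a := PySem.Str.len sec - m + (m - v) - 1) (b := m - v) hstep0).mp rfl
  set k0 := -(PySem.Int.floordiv (-(PySem.Str.len sec - m)) (m - v)) with hk0def
  set mm := -(PySem.Int.floordiv (-(PySem.Str.len sec)) (m - v)) with hmmdef
  set q := PySem.Int.floordiv (PySem.Str.len sec - m + (m - v) - 1) (m - v) with hqdef
  -- the closed-form window index q equals the ceiling k0
  have hqk0 : q = k0 := by
    have h1 : q ≤ k0 := by
      have ha : (q - 1) * (m - v) < k0 * (m - v) := by nlinarith [hq.1, hk0.2]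
      have := lt_of_mul_lt_mul_right ha (le_of_lt hstep0)
      omega
    have h2 : k0 ≤ q := by
      have ha : (k0 - 1) * (m - v) < q * (m - v) := by nlinarith [hq.2, hk0.1]
      have := lt_of_mul_lt_mul_right ha (le_of_lt hstep0)
      omega
    omega
  have hk01 : 1 ≤ k0 := by nlinarith [hk0.2]
  -- with 0 ≤ v the window starts never overshoot the text: k0 ≤ mm - 1
  have hk0mm : k0 ≤ mm - 1 := by
    have ha : k0 * (m - v) < mm * (m - v) := by nlinarith [hq.1, hmm.2, hov, hqk0]
    have := lt_of_mul_lt_mul_right ha (le_of_lt hstep0)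
    omega
  have hmin : min k0 (mm - 1) = k0 := min_eq_left hk0mm
  unfold recursive_char_split pvWindowsB
  rw [if_neg (by omega)]
  simp only [← hqdef, hqk0]
  have hlenN : PySem.Str.len sec = (sec.toList.length : Int) := PySem.Str.len_eq sec
  have hk0L : k0 < PySem.Str.len sec := by
    have hml : mm - 1 ≤ (mm - 1) * (m - v) :=
      le_mul_of_one_le_right (by omega) (by omega)
    omega
  have h2 := pvRcsW sec m v k0 mm (min k0 (mm - 1)) (by omega) hL hk0.1 hk0.2 hmm.1 hmm.2 rfl
    (sec.toList.length + 1) 0 [] le_rfl (by omega)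
    (by rw [hlenN] at hk0L; push_cast; omega)
  rw [hmin] at h2
  simp only [zero_mul, sub_zero, List.nil_append, zero_add] at h2
  rw [h2]

-- ---- titling ----

def pvItem (title : String) (n : Int) (p : String) : String × String :=
  if n == 1 then (title, p) else (title ++ " – Part " ++ PySem.Int.toStr n, p)

def pvNumber (title : String) : Int → List String → List (String × String)
  | _, [] => []
  | n, p :: ps => pvItem title n p :: pvNumber title (n + 1) ps

theorem pvNumber_append (title : String) (n : Int) (xs ys : List String) :
    pvNumber title n (xs ++ ys) =
      pvNumber title n xs ++ pvNumber title (n + xs.length) ys := by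
  induction xs generalizing n with
  | nil => simp [pvNumber]
  | cons x xs ih =>
    simp only [List.cons_append, pvNumber, ih, List.length_cons]
    congr 2
    push_cast
    ring_nf

theorem pvEnum_map (title : String) (ps : List String) (n : Int) :
    (PySem.List.enumerate (ps.map (fun p => (title, p))) n).foldl
        (fun a p => a ++ [pvTitleA title p]) [] = pvNumber title n ps := by
  rw [PySem.List.foldl_append_eq_flatMap (fun p => [pvTitleA title p])]
  simp only [List.nil_append]
  induction ps generalizing n with
  | nil => simp [pvNumber]
  | cons p ps ih =>
    simp only [List.map_cons, PySem.List.enumerate_cons, List.flatMap_cons, ih, pvNumber]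
    simp [pvTitleA, pvItem]

theorem pvInnerFold (title : String) (ps : List String) (out : List (String × String)) :
    ps.foldl
        (fun out p =>
          let n : Int := (out.length : Int) + 1
          out ++ [if n == 1 then (title, p)
                  else (title ++ " – Part " ++ PySem.Int.toStr n, p)]) out =
      out ++ pvNumber title ((out.length : Int) + 1) ps := by
  induction ps generalizing out with
  | nil => simp [pvNumber]
  | cons p ps ih =>
    simp only [List.foldl_cons]
    rw [ih]
    simp only [pvNumber, pvItem, List.append_assoc, List.length_append, List.length_cons,
      List.length_nil, List.cons_append, List.nil_append]
    congr 3

-- ---- section length bound ----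

theorem pvInterCC (x y : List Char) (t : List (List Char)) :
    ['\n'].intercalate (x :: y :: t) = x ++ '\n' :: ['\n'].intercalate (y :: t) := by
  simp [List.intercalate, List.intersperse]

theorem pvJoinLen (ls : List (List Char)) :
    (PySem.Chars.join ['\n'] ls).length = (ls.map List.length).sum + (ls.length - 1) := by
  induction ls with
  | nil => simp [PySem.Chars.join, List.intercalate]
  | cons x ls ih =>
    cases ls with
    | nil => simp [PySem.Chars.join, List.intercalate]
    | cons y t =>
      simp only [PySem.Chars.join] at ih ⊢
      rw [pvInterCC, List.length_append]
      simp only [List.length_cons, List.map_cons, List.sum_cons] at ih ⊢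
      omega

theorem pvGoSum (isB : Char → Bool) (s cur : List Char) (acc : List (List Char)) :
    ((PySem.Chars.splitlines.go isB s cur acc).map List.length).sum +
      ((PySem.Chars.splitlines.go isB s cur acc).length - 1) ≤
      (acc.map List.length).sum + acc.length + cur.length + s.length := by
  induction s, cur, acc using PySem.Chars.splitlines.go.induct isB with
  | case1 cur acc h =>
    rw [PySem.Chars.splitlines.go]
    simp [h]
    omega
  | case2 cur acc h =>
    rw [PySem.Chars.splitlines.go]
    simp [h]
    omega
  | case3 rest cur acc ih =>
    rw [PySem.Chars.splitlines.go]
    simp only [List.map_cons, List.sum_cons, List.length_cons,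
      List.length_reverse, List.length_nil] at ih ⊢
    omega
  | case4 c rest cur acc hx h ih =>
    rw [PySem.Chars.splitlines.go]
    · rw [if_pos h]
      simp only [List.map_cons, List.sum_cons, List.length_cons,
        List.length_reverse, List.length_nil] at ih ⊢
      omega
    · exact hx
  | case5 c rest cur acc hx h ih =>
    rw [PySem.Chars.splitlines.go]
    · rw [if_neg h]
      simp only [List.length_cons] at ih ⊢
      omega
    · exact hx

theorem pvSplitlinesSum (cs : List Char) :
    ((PySem.Chars.splitlines cs).map List.length).sum +
      ((PySem.Chars.splitlines cs).length - 1) ≤ cs.length := by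
  rw [PySem.Chars.splitlines]
  exact le_trans (pvGoSum _ cs [] []) (by simp)

theorem pvRawSecs_sublist (lines : List String) (sec : List String) :
    sec ∈ pvRawSecs lines → sec.Sublist lines := by
  induction lines using pvRawSecs.induct with
  | case1 => intro h; rw [pvRawSecs] at h; simp at h
  | case2 l ls ih =>
    intro h
    rw [pvRawSecs] at h
    rcases List.mem_cons.mp h with h | h
    · subst h
      exact List.cons_sublist_cons.mpr (List.takeWhile_sublist _)
    · exact ((ih h).trans (List.dropWhile_sublist _)).trans (List.sublist_cons_self _ _)

theorem pvStrip_len (cs : List Char) : (PySem.Chars.strip cs).length ≤ cs.length := by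
  have h1 : (PySem.Chars.lstrip cs).length ≤ cs.length := List.length_dropWhile_le _ _
  have h2 : (PySem.Chars.strip cs).length ≤ (PySem.Chars.lstrip cs).length := by
    unfold PySem.Chars.strip PySem.Chars.rstrip
    rw [List.length_reverse]
    exact (List.length_dropWhile_le _ _).trans (le_of_eq List.length_reverse)
  exact h2.trans h1

theorem pvSecLen (content : String) (sec : String)
    (h : sec ∈ pvSectionsB (PySem.Str.splitlines content)) :
    PySem.Str.len sec ≤ PySem.Str.len content := by
  rw [pvSectionsB_eq_rawSecs] at h
  rcases List.mem_map.mp h with ⟨raw, hraw, rfl⟩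
  have hmem : raw ∈ pvRawSecs (PySem.Str.splitlines content) := List.mem_of_mem_filter hraw
  have hsub : raw.Sublist (PySem.Str.splitlines content) :=
    pvRawSecs_sublist _ _ hmem
  have hsub2 : (raw.map String.toList).Sublist (PySem.Chars.splitlines content.toList) := by
    have hmap := hsub.map String.toList
    unfold PySem.Str.splitlines at hmap
    rw [List.map_map] at hmap
    simpa [Function.comp_def, String.toList_ofList] using hmap
  have hstriplen :
      (PySem.Str.strip (PySem.Str.join "\n" raw)).toList.length ≤
        (PySem.Str.join "\n" raw).toList.length := by
    rw [PySem.Str.toList_strip]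
    exact pvStrip_len _
  have hjoin : (PySem.Str.join "\n" raw).toList.length =
      ((raw.map String.toList).map List.length).sum + ((raw.map String.toList).length - 1) := by
    rw [PySem.Str.toList_join]
    have : ("\n" : String).toList = ['\n'] := rfl
    rw [this]
    exact pvJoinLen _
  have hsum : ((raw.map String.toList).map List.length).sum ≤
      ((PySem.Chars.splitlines content.toList).map List.length).sum :=
    List.Sublist.sum_le_sum (hsub2.map List.length) (fun a _ => Nat.zero_le a)
  have hlen2 : (raw.map String.toList).length ≤ (PySem.Chars.splitlines content.toList).length :=
    hsub2.length_le
  have hfin := pvSplitlinesSum content.toList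
  simp only [PySem.Str.len_eq]
  have hnat : (PySem.Str.strip (PySem.Str.join "\n" raw)).toList.length ≤
      content.toList.length := by omega
  exact_mod_cast hnat

theorem pvFlatMapSingleton {α β : Type} (f : α → β) (l : List α) :
    l.flatMap (fun x => [f x]) = l.map f := by
  induction l with
  | nil => rfl
  | cons a l ih => simp [ih]

theorem pvNumber_length (title : String) (n : Int) (ps : List String) :
    (pvNumber title n ps).length = ps.length := by
  induction ps generalizing n with
  | nil => simp [pvNumber]
  | cons p ps ih => simp [pvNumber, ih]

theorem pvOuterFold (title : String) (partsOf : String → List String)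
    (ls : List String) (out : List (String × String)) :
    ls.foldl
        (fun out sec =>
          (partsOf sec).foldl
            (fun out p =>
              let n : Int := (out.length : Int) + 1
              out ++ [if n == 1 then (title, p)
                      else (title ++ " – Part " ++ PySem.Int.toStr n, p)]) out) out =
      out ++ pvNumber title ((out.length : Int) + 1) (ls.flatMap partsOf) := by
  induction ls generalizing out with
  | nil => simp [pvNumber]
  | cons sec ls ih =>
    simp only [List.foldl_cons]
    rw [pvInnerFold, ih, List.flatMap_cons, pvNumber_append, List.append_assoc]
    congr 2
    simp only [List.length_append, pvNumber_length]
    congr 1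
    push_cast
    ring

-- ===== VERDICT (by name: the statement is the Claim_ definition above) =====
theorem chunk_knowledge_spec : Claim_equal_chunk_knowledge := by
  intro title content mx ov _hdom hpre
  unfold Spec_chunk_knowledge chunk_knowledge chunk_knowledge_alt
  dsimp only
  rw [pvSections_eq]
  set secs := if (pvSectionsB (PySem.Str.splitlines content)).isEmpty then [content]
              else pvSectionsB (PySem.Str.splitlines content) with hsecs
  have hstepOf : ∀ sec ∈ secs, ¬ PySem.Str.len sec ≤ mx → 0 ≤ ov ∧ ov < mx := by
    intro sec hsec hle
    rcases hpre with h | h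
    · exact h
    · exfalso
      rw [hsecs] at hsec
      by_cases he : (pvSectionsB (PySem.Str.splitlines content)).isEmpty
      · rw [if_pos he] at hsec
        simp at hsec
        subst hsec
        exact hle h
      · rw [if_neg he] at hsec
        exact hle (le_trans (pvSecLen content sec hsec) h)
  have hAfold : secs.foldl
      (fun acc sec =>
        if PySem.Str.len sec ≤ mx then acc ++ [(title, sec)]
        else (recursive_char_split sec mx ov).foldl
          (fun a part => a ++ [(title, part)]) acc) [] =
      (secs.flatMap (fun sec => if PySem.Str.len sec ≤ mx then [sec]
        else pvWindowsB sec mx ov)).map (fun p => (title, p)) := by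
    rw [PySem.List.foldl_congr_mem secs _
      (fun acc sec => acc ++ ((if PySem.Str.len sec ≤ mx then [sec]
        else pvWindowsB sec mx ov).map (fun p => (title, p)))) []
      ?_]
    · rw [PySem.List.foldl_append_eq_flatMap, ← List.map_flatMap, List.nil_append]
    · intro acc sec hsec
      dsimp only
      by_cases hle : PySem.Str.len sec ≤ mx
      · rw [if_pos hle, if_pos hle]
        simp
      · rw [if_neg hle, if_neg hle]
        rw [PySem.List.foldl_append_eq_flatMap (fun part => [(title, part)])]
        rw [pvRcs_eq sec mx ov (hstepOf sec hsec hle).1 (hstepOf sec hsec hle).2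
          (lt_of_not_ge hle)]
        exact congrArg (acc ++ ·) (pvFlatMapSingleton (fun part => (title, part)) _)
  rw [hAfold, pvEnum_map]
  have hB := pvOuterFold title
    (fun sec => if PySem.Str.len sec ≤ mx then [sec] else pvWindowsB sec mx ov) secs []
  rw [hB]
  simp
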